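-- pv_equiv track=rewrite | github.com/manwar/perlweeklychallenge-club | challenge-343/packy-anderson/python/ch-2.py | champion_team
-- ===== SOURCE A (Python) =====
-- def stronger(i, j, grid):
--   if grid[i][j] == 1: return i
--   if grid[i][j] == 0: return j
--
-- def champion_team(grid):
--   best = []
--   my_max = 0
--   for team in range(len(grid)):
--     my_sum = sum(grid[team])
--     if my_sum > my_max:
--       best = [team]
--       my_max = my_sum
--     elif my_sum == my_max:
--       best.append(team)
--   if len(best) == 1:
--     return best[0]
--   i, j = best
--   return stronger(i, j, grid)
-- ===== SOURCE B (Python) =====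
-- def champion_team(grid):
--     ranked = sorted(range(len(grid)), key=lambda t: (-sum(grid[t]), t))
--     if len(ranked) == 1 or sum(grid[ranked[1]]) < sum(grid[ranked[0]]):
--         return ranked[0]
--     i, j = ranked[0], ranked[1]
--     if grid[i][j] == 1: return i
--     if grid[i][j] == 0: return j
-- ===== Notes on version B (the rewrite author's own statement) =====
-- stated objective: alternative
-- what changed: Replaces A's single-pass running-max loop that accumulates the list of tied leaders by a ranking algorithm: sort the team indices by key (-row sum, index) and decide from the top two entries of the ranking, with no max accumulator and no tie list.
-- outside the precondition, e.g. on champion_team([[0, 5, 0], [5, 0, 0], [0, 0, 0]]): A returns None, B returns None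
import Mathlib
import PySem

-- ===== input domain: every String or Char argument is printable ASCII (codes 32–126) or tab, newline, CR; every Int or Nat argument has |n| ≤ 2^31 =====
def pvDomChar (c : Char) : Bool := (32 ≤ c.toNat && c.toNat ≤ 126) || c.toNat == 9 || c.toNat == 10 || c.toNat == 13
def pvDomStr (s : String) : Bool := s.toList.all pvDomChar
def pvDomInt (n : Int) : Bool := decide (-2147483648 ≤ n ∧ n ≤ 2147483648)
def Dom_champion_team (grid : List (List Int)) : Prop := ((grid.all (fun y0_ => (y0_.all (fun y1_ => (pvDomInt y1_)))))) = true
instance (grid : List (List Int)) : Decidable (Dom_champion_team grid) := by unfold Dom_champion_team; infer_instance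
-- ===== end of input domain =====

-- B replaces A's fused running-max loop (mutable best list + running my_max) by a ranking
-- algorithm: sort the team indices by key (-row sum, index) and decide from the top two
-- entries; the return value is proved equal on Pre_.

-- ===== PORT A =====
def stronger (i j : Int) (grid : List (List Int)) : Option Int :=
  match (PySem.List.pyGet? grid i).bind (fun row => PySem.List.pyGet? row j) with
  | some v => if v = 1 then some i else if v = 0 then some j else none
  | none => none   -- IndexError: outside Pre_

def champion_team (grid : List (List Int)) : Int :=
  let st := (PySem.List.pyRange 0 (PySem.List.len grid) 1).foldl
    (fun (st : List Int × Int) (team : Int) =>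
      let my_sum := (PySem.List.pyGetD grid team []).sum   -- team always in range
      if my_sum > st.2 then ([team], my_sum)
      else if my_sum = st.2 then (st.1 ++ [team], st.2)
      else st) ([], 0)
  if st.1.length = 1 then st.1.getD 0 0
  else
    match st.1 with
    | [i, j] => (stronger i j grid).getD 0   -- getD 0: stronger = none (Python None) is outside Pre_
    | _ => 0                                 -- ValueError on unpacking: outside Pre_

-- ===== PORT B =====
def champion_team_alt (grid : List (List Int)) : Int :=
  let ranked := PySem.List.sorted2 (PySem.List.pyRange 0 (PySem.List.len grid) 1)
      (fun t => -(PySem.List.pyGetD grid t []).sum) (fun t => t)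
  if ranked.length = 1 then ranked.getD 0 0   -- 'len(ranked) == 1 or …' short-circuits
  else if (PySem.List.pyGetD grid (ranked.getD 1 0) []).sum <
          (PySem.List.pyGetD grid (ranked.getD 0 0) []).sum then
    ranked.getD 0 0                           -- getD 0: ranked[1] IndexError (empty grid) is outside Pre_
  else
    let i := ranked.getD 0 0
    let j := ranked.getD 1 0
    match (PySem.List.pyGet? grid i).bind (fun row => PySem.List.pyGet? row j) with
    | some v => if v = 1 then i else if v = 0 then j else 0   -- 0: B returns None there, outside Pre_
    | none => 0                               -- grid[i][j] IndexError: outside Pre_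

-- ===== PRECONDITION & SPEC =====
-- closed-form description of A's final 'best' list: indices whose row sum equals the
-- running maximum max(0, max of row sums)
def pvBest (grid : List (List Int)) : List Int :=
  (PySem.List.enumerate (grid.map (fun row => row.sum))).filterMap
    (fun p => if p.2 = (grid.map (fun row => row.sum)).foldl max 0 then some p.1 else none)

-- Pre_ excludes exactly the inputs on which A does not return an int: best empty or
-- longer than 2 (ValueError on 'i, j = best'), a tie pair whose cell grid[i][j] is out of
-- range (IndexError), or a tie pair whose cell is neither 0 nor 1 (A falls off 'stronger'
-- and returns None, which is not a value of the declared int type).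
def Pre_champion_team (grid : List (List Int)) : Prop :=
  (pvBest grid).length = 1 ∨
  ((pvBest grid).length = 2 ∧
    ((PySem.List.pyGet? grid ((pvBest grid).getD 0 0)).bind
        (fun row => PySem.List.pyGet? row ((pvBest grid).getD 1 0)) = some 0 ∨
     (PySem.List.pyGet? grid ((pvBest grid).getD 0 0)).bind
        (fun row => PySem.List.pyGet? row ((pvBest grid).getD 1 0)) = some 1))
instance (grid : List (List Int)) : Decidable (Pre_champion_team grid) := by
  unfold Pre_champion_team; infer_instance

def pvWitness_champion_team : List (List Int) := [[0, 1], [0, 0]]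

def Spec_champion_team (grid : List (List Int)) (out : Int) : Prop := out = champion_team_alt grid
instance (grid : List (List Int)) (out : Int) : Decidable (Spec_champion_team grid out) := by unfold Spec_champion_team; infer_instance

-- ===== CLAIM (what is proved, stated in full; the proofs are below) =====
def Claim_equal_champion_team : Prop := ∀ (grid : List (List Int)), Dom_champion_team grid → Pre_champion_team grid → Spec_champion_team grid (champion_team grid)

-- ===== LEMMAS AND PROOFS =====

-- ---- A-side: characterisation of A's fused loop ----

-- indices (counting from i) of the elements of the list equal to M
def selIdx (M : Int) (i : Int) : List Int → List Int
  | [] => []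
  | s :: rest => (if s = M then [i] else []) ++ selIdx M (i + 1) rest

lemma sel_enum (M : Int) : ∀ (sums : List Int) (i : Int),
    (PySem.List.enumerate sums i).filterMap (fun p => if p.2 = M then some p.1 else none)
      = selIdx M i sums := by
  intro sums
  induction sums with
  | nil => intro i; simp [PySem.List.enumerate, selIdx]
  | cons s rest ih =>
      intro i
      rw [PySem.List.enumerate_cons]
      by_cases h : s = M <;> simp [selIdx, h, ih]

-- the loop invariant of A's fused running-max pass
lemma loop_inv : ∀ (rows : List (List Int)) (i : Int) (best : List Int) (M : Int),
    (PySem.List.enumerate rows i).foldl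
      (fun (st : List Int × Int) p =>
        if p.2.sum > st.2 then ([p.1], p.2.sum)
        else if p.2.sum = st.2 then (st.1 ++ [p.1], st.2)
        else st)
      (best, M)
    = ((if (rows.map (fun r => r.sum)).foldl max M = M then best else [])
         ++ selIdx ((rows.map (fun r => r.sum)).foldl max M) i (rows.map (fun r => r.sum)),
       (rows.map (fun r => r.sum)).foldl max M) := by
  intro rows
  induction rows with
  | nil => intro i best M; simp [PySem.List.enumerate, selIdx]
  | cons row rest ih =>
      intro i best M
      rw [PySem.List.enumerate_cons, List.foldl_cons]
      dsimp only
      simp only [List.map_cons, List.foldl_cons]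
      rcases lt_trichotomy M row.sum with h1 | h1 | h1
      · rw [if_pos (by omega : row.sum > M), ih (i + 1) [i] row.sum]
        simp only [max_eq_right (le_of_lt h1)]
        have hle := (PySem.List.le_foldl_max (rest.map (fun r => r.sum)) row.sum).1
        have hne2 : ¬ ((rest.map (fun r => r.sum)).foldl max row.sum = M) := by omega
        simp only [selIdx, hne2, if_false, List.nil_append]
        by_cases h2 : row.sum = (rest.map (fun r => r.sum)).foldl max row.sum
        · rw [if_pos h2.symm, if_pos h2]
        · rw [if_neg (fun h => h2 h.symm), if_neg h2]
      · rw [if_neg (by omega : ¬ (row.sum > M)), if_pos h1.symm,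
            ih (i + 1) (best ++ [i]) M]
        simp only [max_eq_left (le_of_eq h1.symm)]
        have hle := (PySem.List.le_foldl_max (rest.map (fun r => r.sum)) M).1
        simp only [selIdx]
        by_cases h3 : (rest.map (fun r => r.sum)).foldl max M = M
        · have h4 : row.sum = (rest.map (fun r => r.sum)).foldl max M := by omega
          rw [if_pos h3, if_pos h3, if_pos h4]
          simp
        · have h4 : ¬ (row.sum = (rest.map (fun r => r.sum)).foldl max M) := by omega
          rw [if_neg h3, if_neg h3, if_neg h4]
          simp
      · rw [if_neg (by omega : ¬ (row.sum > M)), if_neg (by omega : ¬ (row.sum = M)),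
            ih (i + 1) best M]
        simp only [max_eq_left (le_of_lt h1)]
        have hle := (PySem.List.le_foldl_max (rest.map (fun r => r.sum)) M).1
        simp only [selIdx]
        have h4 : ¬ (row.sum = (rest.map (fun r => r.sum)).foldl max M) := by omega
        rw [if_neg h4]
        simp

-- A's loop produces exactly (pvBest grid, running max)
lemma champion_A_eval (grid : List (List Int)) :
    champion_team grid =
      (if (pvBest grid).length = 1 then (pvBest grid).getD 0 0
       else
         match pvBest grid with
         | [i, j] => (stronger i j grid).getD 0
         | _ => 0) := by
  have hbest : pvBest grid
      = selIdx ((grid.map (fun r => r.sum)).foldl max 0) 0 (grid.map (fun r => r.sum)) := by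
    unfold pvBest
    rw [sel_enum]
  have hfold :
      (PySem.List.pyRange 0 (PySem.List.len grid) 1).foldl
        (fun (st : List Int × Int) (team : Int) =>
          let my_sum := (PySem.List.pyGetD grid team []).sum
          if my_sum > st.2 then ([team], my_sum)
          else if my_sum = st.2 then (st.1 ++ [team], st.2)
          else st) ([], 0)
      = (pvBest grid, (grid.map (fun r => r.sum)).foldl max 0) := by
    have h2 := loop_inv grid 0 [] 0
    rw [PySem.List.enumerate_eq_map_pyRange grid ([] : List Int), List.foldl_map] at h2
    refine Eq.trans ?_ (h2.trans ?_)
    · rfl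
    · rw [← hbest]
      simp
  simp only [champion_team]
  rw [hfold]

-- ---- membership / order facts about selIdx ----

lemma mem_selIdx (M : Int) : ∀ (l : List Int) (i x : Int),
    x ∈ selIdx M i l ↔ ∃ p : Nat, x = i + p ∧ l[p]? = some M := by
  intro l
  induction l with
  | nil => intro i x; simp [selIdx]
  | cons s rest ih =>
      intro i x
      simp only [selIdx, List.mem_append]
      constructor
      · rintro (h | h)
        · by_cases hs : s = M
          · simp [hs] at h
            exact ⟨0, by omega, by simp [hs, h]⟩
          · simp [hs] at h
        · obtain ⟨p, hp1, hp2⟩ := (ih (i + 1) x).mp h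
          exact ⟨p + 1, by push_cast; omega, by simpa using hp2⟩
      · rintro ⟨p, hp1, hp2⟩
        cases p with
        | zero =>
            left
            simp at hp2
            simp [hp2, hp1]
        | succ q =>
            right
            refine (ih (i + 1) x).mpr ⟨q, by push_cast at hp1 ⊢; omega, by simpa using hp2⟩

lemma selIdx_pairwise (M : Int) : ∀ (l : List Int) (i : Int),
    (selIdx M i l).Pairwise (· < ·) := by
  intro l
  induction l with
  | nil => intro i; simp [selIdx]
  | cons s rest ih =>
      intro i
      have hge : ∀ x ∈ selIdx M (i + 1) rest, i < x := by
        intro x hx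
        obtain ⟨p, hp1, _⟩ := (mem_selIdx M rest (i + 1) x).mp hx
        have : (0:Int) ≤ p := by positivity
        omega
      by_cases hs : s = M
      · simp only [selIdx, hs, if_pos rfl]
        exact List.pairwise_cons.mpr ⟨hge, ih (i + 1)⟩
      · simpa [selIdx, hs] using ih (i + 1)

-- ---- pvBest characterisation ----

lemma mem_pvBest (grid : List (List Int)) (t : Int) :
    t ∈ pvBest grid ↔ (0 ≤ t ∧ t < grid.length ∧
      (PySem.List.pyGetD grid t []).sum = (grid.map (fun r => r.sum)).foldl max 0) := by
  unfold pvBest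
  rw [sel_enum, mem_selIdx]
  constructor
  · rintro ⟨p, hp1, hp2⟩
    rw [List.getElem?_eq_some_iff] at hp2
    obtain ⟨hlt, heq⟩ := hp2
    rw [List.length_map] at hlt
    refine ⟨by omega, by omega, ?_⟩
    have hg : PySem.List.pyGetD grid t [] = grid[t.toNat] :=
      PySem.List.pyGetD_eq_getElem grid [] (by omega) (by exact_mod_cast (by omega : t < (grid.length : Int)))
    rw [List.getElem_map] at heq
    have ht : t.toNat = p := by omega
    rw [hg]
    simpa [ht] using heq
  · rintro ⟨h0, h1, hS⟩
    refine ⟨t.toNat, by omega, ?_⟩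
    rw [List.getElem?_eq_some_iff]
    refine ⟨by rw [List.length_map]; omega, ?_⟩
    rw [List.getElem_map]
    have hg : PySem.List.pyGetD grid t [] = grid[t.toNat] :=
      PySem.List.pyGetD_eq_getElem grid [] (by omega) (by exact_mod_cast h1)
    rw [hg] at hS
    exact hS

lemma pvBest_pairwise (grid : List (List Int)) : (pvBest grid).Pairwise (· < ·) := by
  unfold pvBest
  rw [sel_enum]
  exact selIdx_pairwise _ _ 0

-- S t ≤ M0 for every valid index
lemma sum_le_M0 (grid : List (List Int)) (t : Int) (h0 : 0 ≤ t) (h1 : t < grid.length) :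
    (PySem.List.pyGetD grid t []).sum ≤ (grid.map (fun r => r.sum)).foldl max 0 := by
  have hg : PySem.List.pyGetD grid t [] = grid[t.toNat]'(by omega) :=
    PySem.List.pyGetD_eq_getElem grid [] (by omega) (by exact_mod_cast h1)
  rw [hg]
  refine (PySem.List.le_foldl_max (grid.map (fun r => r.sum)) 0).2 _ ?_
  exact List.mem_map.mpr ⟨grid[t.toNat]'(by omega), List.getElem_mem _, rfl⟩

-- ---- B-side: the ranking produced by sorted2 ----

def pvK (grid : List (List Int)) (t : Int) : Int := -(PySem.List.pyGetD grid t []).sum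

def pvB (grid : List (List Int)) (a b : Int) : Bool :=
  decide (pvK grid a < pvK grid b) || (!decide (pvK grid b < pvK grid a) && decide (a < b))

def pvRng (grid : List (List Int)) : List Int := PySem.List.pyRange 0 (PySem.List.len grid) 1

def pvRanked (grid : List (List Int)) : List Int :=
  (pvRng grid).foldl (fun acc x => PySem.List.insertBy (pvB grid) x acc) []

lemma champion_B_eval (grid : List (List Int)) :
    champion_team_alt grid =
      (if (pvRanked grid).length = 1 then (pvRanked grid).getD 0 0
       else if (PySem.List.pyGetD grid ((pvRanked grid).getD 1 0) []).sum <
               (PySem.List.pyGetD grid ((pvRanked grid).getD 0 0) []).sum then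
         (pvRanked grid).getD 0 0
       else match (PySem.List.pyGet? grid ((pvRanked grid).getD 0 0)).bind
                 (fun row => PySem.List.pyGet? row ((pvRanked grid).getD 1 0)) with
            | some v => if v = 1 then (pvRanked grid).getD 0 0
                        else if v = 0 then (pvRanked grid).getD 1 0 else 0
            | none => 0) := rfl

lemma pvB_trans (grid : List (List Int)) (a b c : Int)
    (h1 : pvB grid a b = true) (h2 : pvB grid b c = true) : pvB grid a c = true := by
  simp only [pvB, Bool.or_eq_true, Bool.and_eq_true, Bool.not_eq_true', decide_eq_true_eq,
    decide_eq_false_iff_not] at h1 h2 ⊢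
  omega

lemma pvB_asymm (grid : List (List Int)) (a b : Int)
    (h : pvB grid a b = true) : pvB grid b a = false := by
  simp only [pvB, Bool.or_eq_true, Bool.and_eq_true, Bool.not_eq_true', decide_eq_true_eq,
    decide_eq_false_iff_not, Bool.or_eq_false_iff, Bool.and_eq_false_iff,
    Bool.not_eq_false'] at h ⊢
  omega

lemma pvB_false_iff (grid : List (List Int)) (a b : Int) :
    pvB grid a b = false ↔ (pvK grid b ≤ pvK grid a ∧ (pvK grid b < pvK grid a ∨ b ≤ a)) := by
  simp only [pvB, Bool.or_eq_false_iff, Bool.and_eq_false_iff, Bool.not_eq_false',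
    decide_eq_false_iff_not, decide_eq_true_iff]
  omega

lemma insertBy_perm {α : Type} (before : α → α → Bool) (x : α) :
    ∀ ys : List α, (PySem.List.insertBy before x ys).Perm (x :: ys) := by
  intro ys
  induction ys with
  | nil => simp [PySem.List.insertBy]
  | cons y ys ih =>
      show (if before x y then x :: y :: ys else y :: PySem.List.insertBy before x ys).Perm _
      split
      · exact List.Perm.refl _
      · exact (ih.cons y).trans (List.Perm.swap x y ys)

lemma foldl_insertBy_perm {α : Type} (before : α → α → Bool) :
    ∀ (xs acc : List α),
      (xs.foldl (fun a x => PySem.List.insertBy before x a) acc).Perm (xs ++ acc) := by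
  intro xs
  induction xs with
  | nil => intro acc; simp
  | cons x xs ih =>
      intro acc
      exact (ih (PySem.List.insertBy before x acc)).trans
        (((insertBy_perm before x acc).append_left xs).trans List.perm_middle)

lemma insertBy_sorted (grid : List (List Int)) (x : Int) :
    ∀ acc : List Int, acc.Pairwise (fun a b => pvB grid b a = false) →
      (PySem.List.insertBy (pvB grid) x acc).Pairwise (fun a b => pvB grid b a = false) := by
  intro acc
  induction acc with
  | nil => intro _; simp [PySem.List.insertBy]
  | cons y ys ih =>
      intro h
      obtain ⟨hy, hys⟩ := List.pairwise_cons.mp h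
      show (if pvB grid x y then x :: y :: ys else
              y :: PySem.List.insertBy (pvB grid) x ys).Pairwise _
      split
      case isTrue hxy =>
        refine List.pairwise_cons.mpr ⟨?_, h⟩
        intro z hz
        rcases List.mem_cons.mp hz with rfl | hz
        · exact pvB_asymm grid x z hxy
        · by_contra hzx
          have hzx' : pvB grid z x = true := by
            cases hzz : pvB grid z x with
            | false => exact absurd hzz hzx
            | true => rfl
          have := pvB_trans grid z x y hzx' hxy
          rw [hy z hz] at this
          exact Bool.false_ne_true this
      case isFalse hxy =>
        refine List.pairwise_cons.mpr ⟨?_, ih hys⟩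
        intro z hz
        rcases (PySem.List.mem_insertBy (pvB grid) x z ys).mp hz with rfl | hz
        · exact Bool.of_not_eq_true hxy
        · exact hy z hz

lemma ranked_perm (grid : List (List Int)) : (pvRanked grid).Perm (pvRng grid) := by
  have := foldl_insertBy_perm (pvB grid) (pvRng grid) []
  simpa [pvRanked] using this

lemma ranked_sorted (grid : List (List Int)) :
    (pvRanked grid).Pairwise (fun a b => pvB grid b a = false) := by
  unfold pvRanked
  generalize (pvRng grid) = xs
  have : ∀ (xs acc : List Int), acc.Pairwise (fun a b => pvB grid b a = false) →
      (xs.foldl (fun a x => PySem.List.insertBy (pvB grid) x a) acc).Pairwise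
        (fun a b => pvB grid b a = false) := by
    intro xs
    induction xs with
    | nil => intro acc h; simpa using h
    | cons x xs ih => intro acc h; exact ih _ (insertBy_sorted grid x acc h)
  exact this xs [] (by simp)

lemma mem_rng (grid : List (List Int)) (t : Int) :
    t ∈ pvRng grid ↔ 0 ≤ t ∧ t < grid.length := by
  unfold pvRng
  rw [PySem.List.mem_pyRange_one]
  have hl : PySem.List.len grid = (grid.length : Int) := rfl
  rw [hl]

lemma rng_nodup (grid : List (List Int)) : (pvRng grid).Nodup := by
  unfold pvRng
  have : PySem.List.len grid = ((grid.length : Nat) : Int) := rfl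
  rw [this, PySem.List.pyRange_zero_natCast]
  exact (List.nodup_range).map (fun a b h => by exact_mod_cast h)

-- ===== VERDICT (by name: the statement is the Claim_ definition above) =====
theorem champion_team_spec : Claim_equal_champion_team := by
  intro grid _ hpre
  unfold Spec_champion_team
  have hperm := ranked_perm grid
  have hsort := ranked_sorted grid
  have hnd : (pvRanked grid).Nodup := (List.Perm.nodup_iff hperm).mpr (rng_nodup grid)
  have hmemR : ∀ t : Int, t ∈ pvRanked grid ↔ (0 ≤ t ∧ t < grid.length) := by
    intro t; rw [hperm.mem_iff, mem_rng]
  rcases hpre with hlen | ⟨hlen, hv⟩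
  · -- unique leader
    obtain ⟨u, hb⟩ := List.length_eq_one_iff.mp hlen
    obtain ⟨hu0, hu1, huS⟩ := (mem_pvBest grid u).mp (by rw [hb]; exact List.mem_cons_self)
    have uniq : ∀ s : Int, 0 ≤ s → s < grid.length →
        (PySem.List.pyGetD grid s []).sum = (grid.map (fun r => r.sum)).foldl max 0 →
        s = u := by
      intro s hs0 hs1 hsS
      have hm : s ∈ pvBest grid := (mem_pvBest grid s).mpr ⟨hs0, hs1, hsS⟩
      rw [hb] at hm; simpa using hm
    have huR : u ∈ pvRanked grid := (hmemR u).mpr ⟨hu0, hu1⟩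
    have hA : champion_team grid = u := by
      rw [champion_A_eval, hb]; simp
    cases hR : pvRanked grid with
    | nil => rw [hR] at huR; simp at huR
    | cons h0 T =>
      obtain ⟨hhd, htl⟩ := List.pairwise_cons.mp (hR ▸ hsort)
      obtain ⟨hh0a, hh0b⟩ := (hmemR h0).mp (by rw [hR]; exact List.mem_cons_self)
      have hS0le := sum_le_M0 grid h0 hh0a hh0b
      have hS0 : (PySem.List.pyGetD grid h0 []).sum
          = (grid.map (fun r => r.sum)).foldl max 0 := by
        rcases List.mem_cons.mp (hR ▸ huR) with h | h
        · rw [← h]; exact huS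
        · have hf := ((pvB_false_iff grid u h0).mp (hhd u h)).1
          unfold pvK at hf
          omega
      have hh0u : h0 = u := uniq h0 hh0a hh0b hS0
      cases T with
      | nil =>
        have hB : champion_team_alt grid = h0 := by
          rw [champion_B_eval, hR]; simp
        rw [hA, hB, hh0u]
      | cons h1 T' =>
        obtain ⟨hh1a, hh1b⟩ := (hmemR h1).mp
          (by rw [hR]; exact List.mem_cons_of_mem _ List.mem_cons_self)
        have hne : h1 ≠ h0 := by
          have hnin := (List.nodup_cons.mp (hR ▸ hnd)).1
          intro he
          exact hnin (by rw [← he]; exact List.mem_cons_self)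
        have hS1 : (PySem.List.pyGetD grid h1 []).sum <
            (PySem.List.pyGetD grid h0 []).sum := by
          have hle := sum_le_M0 grid h1 hh1a hh1b
          by_cases he : (PySem.List.pyGetD grid h1 []).sum
              = (grid.map (fun r => r.sum)).foldl max 0
          · exact absurd (by rw [uniq h1 hh1a hh1b he, ← hh0u]) hne
          · omega
        have hB : champion_team_alt grid = h0 := by
          rw [champion_B_eval, hR]
          rw [if_neg (by simp : ¬ ((h0 :: h1 :: T').length = 1))]
          simp only [List.getD_cons_zero, List.getD_cons_succ]
          rw [if_pos hS1]
        rw [hA, hB, hh0u]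
  · -- two-way tie, decided head-to-head
    obtain ⟨i, j, hb⟩ := List.length_eq_two.mp hlen
    rw [hb] at hv
    simp only [List.getD_cons_zero, List.getD_cons_succ] at hv
    have hij : i < j := by
      have hp := pvBest_pairwise grid
      rw [hb] at hp
      exact (List.pairwise_cons.mp hp).1 j List.mem_cons_self
    obtain ⟨hi0, hi1, hiS⟩ := (mem_pvBest grid i).mp (by rw [hb]; exact List.mem_cons_self)
    obtain ⟨hj0, hj1, hjS⟩ := (mem_pvBest grid j).mp
      (by rw [hb]; exact List.mem_cons_of_mem _ List.mem_cons_self)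
    have uniq2 : ∀ s : Int, 0 ≤ s → s < grid.length →
        (PySem.List.pyGetD grid s []).sum = (grid.map (fun r => r.sum)).foldl max 0 →
        s = i ∨ s = j := by
      intro s hs0 hs1 hsS
      have hm : s ∈ pvBest grid := (mem_pvBest grid s).mpr ⟨hs0, hs1, hsS⟩
      rw [hb] at hm; simpa using hm
    have hiR : i ∈ pvRanked grid := (hmemR i).mpr ⟨hi0, hi1⟩
    have hjR : j ∈ pvRanked grid := (hmemR j).mpr ⟨hj0, hj1⟩
    have hA : champion_team grid = (stronger i j grid).getD 0 := by
      rw [champion_A_eval, hb]; simp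
    cases hR : pvRanked grid with
    | nil => rw [hR] at hiR; simp at hiR
    | cons h0 T =>
      obtain ⟨hhd, htl⟩ := List.pairwise_cons.mp (hR ▸ hsort)
      obtain ⟨hh0a, hh0b⟩ := (hmemR h0).mp (by rw [hR]; exact List.mem_cons_self)
      have hS0le := sum_le_M0 grid h0 hh0a hh0b
      have hS0 : (PySem.List.pyGetD grid h0 []).sum
          = (grid.map (fun r => r.sum)).foldl max 0 := by
        rcases List.mem_cons.mp (hR ▸ hiR) with h | h
        · rw [← h]; exact hiS
        · have hf := ((pvB_false_iff grid i h0).mp (hhd i h)).1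
          unfold pvK at hf
          omega
      have hh0i : h0 = i := by
        rcases uniq2 h0 hh0a hh0b hS0 with h | h
        · exact h
        · -- h0 = j: then i sits behind h0 in the ranking, contradicting i < j
          exfalso
          have hiT : i ∈ T := by
            rcases List.mem_cons.mp (hR ▸ hiR) with h' | h'
            · omega
            · exact h'
          have hf := (pvB_false_iff grid i h0).mp (hhd i hiT)
          unfold pvK at hf
          omega
      cases T with
      | nil =>
        exfalso
        rcases List.mem_cons.mp (hR ▸ hjR) with h | h
        · omega
        · simp at h
      | cons h1 T' =>
        obtain ⟨hh1a, hh1b⟩ := (hmemR h1).mp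
          (by rw [hR]; exact List.mem_cons_of_mem _ List.mem_cons_self)
        have hh1j : h1 = j := by
          rcases List.mem_cons.mp (hR ▸ hjR) with h | h
          · omega
          · rcases List.mem_cons.mp h with h' | h'
            · exact h'.symm
            · -- j ∈ T': then h1 is also a leader, forcing h1 = j, against Nodup
              exfalso
              have hhd1 := (List.pairwise_cons.mp htl).1
              have hf := ((pvB_false_iff grid j h1).mp (hhd1 j h')).1
              unfold pvK at hf
              have hle := sum_le_M0 grid h1 hh1a hh1b
              have hS1 : (PySem.List.pyGetD grid h1 []).sum
                  = (grid.map (fun r => r.sum)).foldl max 0 := by omega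
              have hnin := (List.nodup_cons.mp (List.nodup_cons.mp (hR ▸ hnd)).2).1
              rcases uniq2 h1 hh1a hh1b hS1 with h'' | h''
              · have he : h0 = h1 := by omega
                exact (List.nodup_cons.mp (hR ▸ hnd)).1 (he ▸ List.mem_cons_self)
              · exact hnin (h'' ▸ h')
        have hSeq : ¬ ((PySem.List.pyGetD grid h1 []).sum <
            (PySem.List.pyGetD grid h0 []).sum) := by
          rw [hh0i, hh1j, hiS, hjS]
          omega
        have hB : champion_team_alt grid =
            (match (PySem.List.pyGet? grid i).bind
                  (fun row => PySem.List.pyGet? row j) with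
             | some v => if v = 1 then i else if v = 0 then j else 0
             | none => 0) := by
          rw [champion_B_eval, hR]
          rw [if_neg (by simp : ¬ ((h0 :: h1 :: T').length = 1))]
          simp only [List.getD_cons_zero, List.getD_cons_succ]
          rw [if_neg hSeq, hh0i, hh1j]
        rw [hA, hB]
        rcases hv with hv | hv
        · rw [stronger, hv]
          simp
        · rw [stronger, hv]
          simp
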